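-- pv_equiv track=rewrite | github.com/hector-han/zxx | util.py | which_cluster_belong
-- ===== SOURCE A (Python) =====
-- def which_cluster_belong(tweet, w_cluster):
--     num_of_cluster = len(w_cluster)
--     indicator = [0 for i in range(num_of_cluster)]
--     for word in tweet.split():
--         for i in range(num_of_cluster):
--             if word in w_cluster[i]:
--                 indicator[i] += 1
--                 break
--     return indicator.index(max(indicator))
-- ===== SOURCE B (Python) =====
-- def which_cluster_belong(tweet, w_cluster):
--     words = tweet.split()
--     assigned = set()
--     indicator = []
--     for cluster in w_cluster:
--         indicator.append(sum(1 for w in words if w in cluster and w not in assigned))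
--         assigned.update(w for w in words if w in cluster)
--     return indicator.index(max(indicator))
-- ===== Notes on version B (the rewrite author's own statement) =====
-- stated objective: alternative
-- what changed: Reverses the loop nesting: instead of scanning clusters per word with a break, B iterates clusters in order and counts the words not yet claimed by an earlier cluster, maintaining a set of already-assigned words.
import Mathlib
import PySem

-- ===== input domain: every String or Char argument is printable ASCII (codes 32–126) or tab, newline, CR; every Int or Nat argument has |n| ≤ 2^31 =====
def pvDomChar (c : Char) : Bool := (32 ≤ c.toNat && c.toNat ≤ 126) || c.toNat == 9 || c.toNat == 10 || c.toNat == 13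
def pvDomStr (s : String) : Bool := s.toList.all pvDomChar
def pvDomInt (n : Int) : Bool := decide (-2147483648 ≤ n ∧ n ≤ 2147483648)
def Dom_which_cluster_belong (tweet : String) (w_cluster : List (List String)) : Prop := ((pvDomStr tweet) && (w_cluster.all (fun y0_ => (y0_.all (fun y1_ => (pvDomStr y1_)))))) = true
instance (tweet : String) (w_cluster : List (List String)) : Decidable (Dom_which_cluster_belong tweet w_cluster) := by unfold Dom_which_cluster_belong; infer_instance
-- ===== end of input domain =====

-- B reverses the loop nesting (clusters outer, words inner, with a set of already-claimed
-- words) instead of A's word-outer scan with a break; equivalent, not claimed faster.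

-- ===== PORT A =====
-- the inner 'for i in range(num_of_cluster): if word in w_cluster[i]: indicator[i] += 1; break'
-- (clusters and indicator have the same length, so the index loop is this parallel recursion)
def pvBump (word : String) : List (List String) → List Int → List Int
  | [], ind => ind
  | _ :: _, [] => []
  | c :: cs, x :: xs => if c.contains word then (x + 1) :: xs else x :: pvBump word cs xs

def which_cluster_belong (tweet : String) (w_cluster : List (List String)) : Int :=
  let num_of_cluster := w_cluster.length
  let indicator : List Int := (List.range num_of_cluster).map (fun _ => 0)
  let indicator := (PySem.Str.split₀ tweet).foldl (fun ind word => pvBump word w_cluster ind) indicator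
  match PySem.List.max? indicator (fun x => x) with
  | some m => ((PySem.List.index? indicator m).getD 0 : Int)   -- max is in the list, so index? hits
  | none => 0    -- unreachable under Pre_ : Python's max([]) raises ValueError

-- ===== PORT B =====
def which_cluster_belong_alt (tweet : String) (w_cluster : List (List String)) : Int :=
  let words := PySem.Str.split₀ tweet
  let st := w_cluster.foldl
    (fun (st : PySem.Set String × List Int) cluster =>
      let cnt : Int := (words.filter (fun w => cluster.contains w && !(PySem.Set.contains st.1 w))).length
      (PySem.Set.update st.1 (words.filter (fun w => cluster.contains w)), st.2 ++ [cnt]))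
    (PySem.Set.empty, [])
  let indicator := st.2
  match PySem.List.max? indicator (fun x => x) with
  | some m => ((PySem.List.index? indicator m).getD 0 : Int)
  | none => 0    -- unreachable under Pre_ : Python's max([]) raises ValueError

-- ===== PRECONDITION & SPEC =====
-- Pre_ excludes only w_cluster = [], where both Pythons raise ValueError (max of an empty list).
def Pre_which_cluster_belong (tweet : String) (w_cluster : List (List String)) : Prop := w_cluster ≠ []
instance (tweet : String) (w_cluster : List (List String)) : Decidable (Pre_which_cluster_belong tweet w_cluster) := by unfold Pre_which_cluster_belong; infer_instance
def pvWitness_which_cluster_belong : String × List (List String) := ("a b a", [["c"], ["a", "b"]])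

def Spec_which_cluster_belong (tweet : String) (w_cluster : List (List String)) (out : Int) : Prop := out = which_cluster_belong_alt tweet w_cluster
instance (tweet : String) (w_cluster : List (List String)) (out : Int) : Decidable (Spec_which_cluster_belong tweet w_cluster out) := by unfold Spec_which_cluster_belong; infer_instance

-- ===== CLAIM (what is proved, stated in full; the proofs are below) =====
def Claim_equal_which_cluster_belong : Prop := ∀ (tweet : String) (w_cluster : List (List String)), Dom_which_cluster_belong tweet w_cluster → Pre_which_cluster_belong tweet w_cluster → Spec_which_cluster_belong tweet w_cluster (which_cluster_belong tweet w_cluster)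

-- ===== LEMMAS AND PROOFS =====

-- canonical indicator: first cluster claims its words, later clusters see the rest
def pvG : List (List String) → List String → List Int
  | [], _ => []
  | c :: cs, ws => ((ws.countP (fun w => c.contains w) : Int)) :: pvG cs (ws.filter (fun w => !(c.contains w)))

theorem pvBump_nil (w : String) (ind : List Int) : pvBump w [] ind = ind := rfl

theorem pvZeros (n : Nat) : (List.range n).map (fun _ => (0 : Int)) = List.replicate n 0 := by
  simp [List.map_const']

theorem pvA_loop (c : List String) (cs : List (List String)) :
    ∀ (words : List String) (x : Int) (xs : List Int),
    words.foldl (fun ind w => pvBump w (c :: cs) ind) (x :: xs)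
      = (x + (words.countP (fun w => c.contains w) : Int))
        :: (words.filter (fun w => !(c.contains w))).foldl (fun ind w => pvBump w cs ind) xs := by
  intro words
  induction words with
  | nil => intro x xs; simp
  | cons w ws ih =>
    intro x xs
    by_cases h : w ∈ c
    · rw [List.foldl_cons]
      have hb : pvBump w (c :: cs) (x :: xs) = (x + 1) :: xs := by
        simp [pvBump, h]
      rw [hb, ih]
      simp [h]
      ring
    · rw [List.foldl_cons]
      have hb : pvBump w (c :: cs) (x :: xs) = x :: pvBump w cs xs := by
        simp [pvBump, h]
      rw [hb, ih]
      simp [h]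

theorem pvA_eq_G (cs : List (List String)) :
    ∀ (words : List String),
    words.foldl (fun ind w => pvBump w cs ind) ((List.range cs.length).map (fun _ => (0 : Int)))
      = pvG cs words := by
  induction cs with
  | nil =>
    intro words
    simp only [pvG, List.length_nil, List.range_zero, List.map_nil]
    induction words with
    | nil => rfl
    | cons w ws ih => simp [pvBump_nil]
  | cons c cs ih =>
    intro words
    rw [pvZeros, List.length_cons, List.replicate_succ, pvA_loop, ← pvZeros, ih]
    simp [pvG]

theorem pvB_loop (words : List String) :
    ∀ (cs : List (List String)) (assigned : PySem.Set String) (acc : List Int),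
    (cs.foldl
      (fun (st : PySem.Set String × List Int) cluster =>
        let cnt : Int := (words.filter (fun w => cluster.contains w && !(PySem.Set.contains st.1 w))).length
        (PySem.Set.update st.1 (words.filter (fun w => cluster.contains w)), st.2 ++ [cnt]))
      (assigned, acc)).2
    = acc ++ pvG cs (words.filter (fun w => !(PySem.Set.contains assigned w))) := by
  intro cs
  induction cs with
  | nil => intro assigned acc; simp [pvG]
  | cons c cs ih =>
    intro assigned acc
    rw [List.foldl_cons, ih]
    have h1 : words.filter (fun w => c.contains w && !(PySem.Set.contains assigned w))
        = (words.filter (fun w => !(PySem.Set.contains assigned w))).filter (fun w => c.contains w) := by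
      rw [List.filter_filter]
    have h2 : words.filter
          (fun w => !(PySem.Set.contains (PySem.Set.update assigned (words.filter (fun w => c.contains w))) w))
        = (words.filter (fun w => !(PySem.Set.contains assigned w))).filter (fun w => !(c.contains w)) := by
      rw [List.filter_filter]
      apply List.filter_congr
      intro w hw
      simp only [PySem.Set.contains_eq_decide, PySem.Set.mem_update, List.mem_filter]
      by_cases hc : w ∈ c <;> by_cases ha : w ∈ assigned <;> simp_all
    rw [h1, h2]
    simp only [pvG, List.countP_eq_length_filter, List.append_assoc, List.singleton_append]

theorem pv_indicators_eq (tweet : String) (w_cluster : List (List String)) :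
    (PySem.Str.split₀ tweet).foldl (fun ind w => pvBump w w_cluster ind)
      ((List.range w_cluster.length).map (fun _ => (0 : Int)))
    = (w_cluster.foldl
        (fun (st : PySem.Set String × List Int) cluster =>
          let cnt : Int := ((PySem.Str.split₀ tweet).filter (fun w => cluster.contains w && !(PySem.Set.contains st.1 w))).length
          (PySem.Set.update st.1 ((PySem.Str.split₀ tweet).filter (fun w => cluster.contains w)), st.2 ++ [cnt]))
        (PySem.Set.empty, [])).2 := by
  rw [pvA_eq_G, pvB_loop]
  have h : (PySem.Str.split₀ tweet).filter (fun w => !(PySem.Set.contains (PySem.Set.empty (α := String)) w))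
      = PySem.Str.split₀ tweet := by
    apply List.filter_eq_self.mpr
    intro w _
    simp [PySem.Set.empty]
  rw [h]
  simp

-- ===== VERDICT (by name: the statement is the Claim_ definition above) =====
theorem which_cluster_belong_spec : Claim_equal_which_cluster_belong := by
  intro tweet w_cluster _ _
  unfold Spec_which_cluster_belong which_cluster_belong which_cluster_belong_alt
  simp only [pv_indicators_eq tweet w_cluster]
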